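-- pv_equiv track=rewrite | github.com/NemegeerWolf/NemegeerWolf-2020-2021 | oef4_thuis.py | controleer_emailadres
-- ===== SOURCE A (Python) =====
-- def controleer_emailadres(email_adress):
--
--     punt1_geweest = False
--     apenstaartje_geweest = False
--     student_punt_howest_geschreven = False
--     punt2_geweest = False
--
--     index = 0;
--     for symbool in email_adress:
--
--         if symbool == ".":
--             if punt1_geweest == False:
--                 punt1_geweest = True
--
--
--
--         if symbool == "@":
--             if punt1_geweest == True:
--                 apenstaartje_geweest = True
--
--                 if str.lower(email_adress[index+1:]) == "student.howest.be":
--                     return "dit email adres is juist"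
--                 else:
--                     return "het adres voor een student van howest is 'student.howest.be'"
--
--             else:
--                 return "er moet een punt tussen je voor en achternaam"
--         index += 1
-- ===== SOURCE B (Python) =====
-- def controleer_emailadres(email_adress):
--     idx = email_adress.find("@")
--     if idx == -1:
--         return None
--     if "." not in email_adress[:idx]:
--         return "er moet een punt tussen je voor en achternaam"
--     if email_adress[idx+1:].lower() == "student.howest.be":
--         return "dit email adres is juist"
--     return "het adres voor een student van howest is 'student.howest.be'"
-- ===== Notes on version B (the rewrite author's own statement) =====
-- stated objective: simpler
-- what changed: Replaces the character loop with flag variables and a running index by three direct string operations: find the first '@', test '.' in the prefix, compare the lowercased suffix.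
import Mathlib
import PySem

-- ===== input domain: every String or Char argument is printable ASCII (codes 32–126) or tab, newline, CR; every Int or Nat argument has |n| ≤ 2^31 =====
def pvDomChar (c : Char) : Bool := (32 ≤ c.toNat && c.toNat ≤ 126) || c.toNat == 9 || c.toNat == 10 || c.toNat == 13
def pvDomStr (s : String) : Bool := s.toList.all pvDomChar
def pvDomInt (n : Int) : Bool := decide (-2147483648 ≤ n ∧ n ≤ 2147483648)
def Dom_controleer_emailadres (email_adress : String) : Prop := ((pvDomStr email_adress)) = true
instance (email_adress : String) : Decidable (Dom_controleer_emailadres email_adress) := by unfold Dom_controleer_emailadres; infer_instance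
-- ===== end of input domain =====

-- B replaces A's character loop with flag variables by three direct string operations
-- (find the first '@', '.'-in-prefix test, lowercased-suffix comparison); objective: simpler.

-- ===== PORT A =====
-- the loop of A: scans characters, maintaining the punt1 flag and the running index
def pvA_loop (email : String) (rest : List Char) (punt1 : Bool) (index : Nat) : Option String :=
  match rest with
  | [] => none
  | symbool :: rest' =>
    let punt1' := if symbool = '.' then (if punt1 = false then true else punt1) else punt1
    if symbool = '@' then
      if punt1' = true then
        if PySem.Str.lower (PySem.Str.slice email (some ((index : Int) + 1)) none) = "student.howest.be"
        then some "dit email adres is juist"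
        else some "het adres voor een student van howest is 'student.howest.be'"
      else some "er moet een punt tussen je voor en achternaam"
    else pvA_loop email rest' punt1' (index + 1)

def controleer_emailadres (email_adress : String) : Option String :=
  pvA_loop email_adress email_adress.toList false 0

-- ===== PORT B =====
def controleer_emailadres_alt (email_adress : String) : Option String :=
  let idx := PySem.Str.find email_adress "@"
  if idx = -1 then none
  else if PySem.Str.isIn "." (PySem.Str.slice email_adress none (some idx)) = false then
    some "er moet een punt tussen je voor en achternaam"
  else if PySem.Str.lower (PySem.Str.slice email_adress (some (idx + 1)) none) = "student.howest.be" then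
    some "dit email adres is juist"
  else some "het adres voor een student van howest is 'student.howest.be'"

-- ===== PRECONDITION & SPEC =====
def Spec_controleer_emailadres (email_adress : String) (out : Option String) : Prop := out = controleer_emailadres_alt email_adress
instance (email_adress : String) (out : Option String) : Decidable (Spec_controleer_emailadres email_adress out) := by unfold Spec_controleer_emailadres; infer_instance

-- ===== CLAIM (what is proved, stated in full; the proofs are below) =====
def Claim_equal_controleer_emailadres : Prop := ∀ (email_adress : String), Dom_controleer_emailadres email_adress → Spec_controleer_emailadres email_adress (controleer_emailadres email_adress)

-- ===== LEMMAS AND PROOFS =====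

theorem pv_singleton_prefix_iff (a : Char) (xs : List Char) :
    [a] <+: xs ↔ xs.head? = some a := by
  cases xs <;> simp [List.cons_prefix_iff]

-- if l[k] = '@' and no '@' occurs before k, the Python find lands exactly on k
theorem pv_find_eq (l : List Char) (k : Nat) (hk : k < l.length)
    (hck : l[k] = '@') (hat : '@' ∉ l.take k) :
    PySem.Chars.find l ['@'] = (k : Int) := by
  have hinf : ['@'] <:+: l := (List.singleton_infix_iff _ _).mpr (by
    rw [← hck]; exact List.getElem_mem hk)
  have h0 : 0 ≤ PySem.Chars.find l ['@'] := (PySem.Chars.find_nonneg_iff _ _).mpr hinf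
  obtain ⟨hpre, hmin⟩ := PySem.Chars.find_spec h0
  set f := (PySem.Chars.find l ['@']).toNat with hf
  have hatj : ∀ j, j < k → l[j]? ≠ some '@' := by
    intro j hj habs
    have hjlt : j < l.length := by
      by_contra h
      simp [List.getElem?_eq_none (Nat.le_of_not_lt h)] at habs
    apply hat
    have : l[j] = '@' := by simpa [List.getElem?_eq_getElem hjlt] using habs
    rw [← this]
    exact List.mem_take_iff_getElem.mpr ⟨j, by omega, by simp⟩
  have hfk : ¬ f < k := by
    intro hlt
    have := (pv_singleton_prefix_iff '@' (l.drop f)).mp hpre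
    rw [List.head?_drop] at this
    exact hatj f hlt this
  have hkf : ¬ k < f := by
    intro hlt
    apply hmin k hlt
    rw [pv_singleton_prefix_iff, List.head?_drop]
    simp [List.getElem?_eq_getElem hk, hck]
  have : f = k := by omega
  omega

theorem pv_loop_invariant (email : String) :
    ∀ (n k : Nat), email.toList.length - k = n → '@' ∉ email.toList.take k →
      pvA_loop email (email.toList.drop k) (decide ('.' ∈ email.toList.take k)) k
        = controleer_emailadres_alt email := by
  intro n
  induction n with
  | zero =>
    intro k hn hat
    have hk : email.toList.length ≤ k := by omega
    have hdrop : email.toList.drop k = [] := List.drop_eq_nil_of_le hk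
    have htake : email.toList.take k = email.toList := List.take_of_length_le hk
    rw [htake] at hat
    have hfindC : PySem.Chars.find email.toList ['@'] = -1 :=
      (PySem.Chars.find_eq_neg_one_iff _ _).mpr (by rw [List.singleton_infix_iff]; exact hat)
    rw [hdrop]
    simp [pvA_loop, controleer_emailadres_alt, hfindC]
  | succ n ih =>
    intro k hn hat
    have hk : k < email.toList.length := by omega
    rw [List.drop_eq_getElem_cons hk]
    by_cases hc : email.toList[k] = '@'
    · -- the loop returns here; B's find is exactly k
      have hfindC : PySem.Chars.find email.toList ['@'] = (k : Int) :=
        pv_find_eq email.toList k hk hc hat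
      have hkne : ((k : Int)) ≠ -1 := by omega
      have hsl : PySem.List.slice email.toList none (some ((k : Int))) = email.toList.take k :=
        PySem.List.slice_to_natCast _ _
      have hdotiff : PySem.Chars.isIn ['.'] (email.toList.take k)
          = decide ('.' ∈ email.toList.take k) := by
        by_cases hm : '.' ∈ email.toList.take k
        · rw [(PySem.Chars.isIn_iff_infix _ _).mpr ((List.singleton_infix_iff _ _).mpr hm)]
          simp [hm]
        · rw [(PySem.Chars.isIn_eq_false_iff _ _).mpr (by rw [List.singleton_infix_iff]; exact hm)]
          simp [hm]
      by_cases hdot : '.' ∈ email.toList.take k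
      · simp [pvA_loop, hc, controleer_emailadres_alt, hfindC, hkne, hsl, hdotiff, hdot]
      · simp [pvA_loop, hc, controleer_emailadres_alt, hfindC, hkne, hsl, hdotiff, hdot]
    · -- not '@': one more step of the loop
      have htk : email.toList.take (k + 1) = email.toList.take k ++ [email.toList[k]] := by
        rw [List.take_succ, List.getElem?_eq_getElem hk]; rfl
      have hstep : (if email.toList[k] = '.' then (if decide ('.' ∈ email.toList.take k) = false then true else decide ('.' ∈ email.toList.take k)) else decide ('.' ∈ email.toList.take k)) = decide ('.' ∈ email.toList.take (k + 1)) := by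
        by_cases hd : email.toList[k] = '.'
        · by_cases hm : '.' ∈ email.toList.take k <;> simp [hd, hm, htk]
        · rw [if_neg hd, htk]
          simp only [List.mem_append, List.mem_singleton]
          have hd' : ¬ ('.' = email.toList[k]) := fun h => hd h.symm
          simp [hd']
      have hat' : '@' ∉ email.toList.take (k + 1) := by
        rw [htk]
        intro h
        rcases List.mem_append.mp h with h | h
        · exact hat h
        · simp at h; exact hc h.symm
      have hrec := ih (k + 1) (by omega) hat'
      simp only [pvA_loop, if_neg hc]
      rw [hstep]
      exact hrec

-- ===== VERDICT (by name: the statement is the Claim_ definition above) =====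
theorem controleer_emailadres_spec : Claim_equal_controleer_emailadres := by
  intro s _hd
  unfold Spec_controleer_emailadres controleer_emailadres
  simpa using pv_loop_invariant s s.toList.length 0 (by omega) (by simp)
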